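-- pv_equiv track=rewrite | github.com/aanaolaru/Python | Lab 2/ex 7.py | palindromeNumbers
-- ===== SOURCE A (Python) =====
-- def palindromeNumbers(list):
--   count=0
--   for n in list:
--         copy=n
--         pal = 0
--         while copy > 0:
--             pal = pal*10 + copy % 10
--             copy = copy//10
--         if(n==pal):
--             count+=1
--   return count
-- ===== SOURCE B (Python) =====
-- def palindromeNumbers(list):
--     count = 0
--     for n in list:
--         if n < 0:
--             continue
--         digits = []
--         copy = n
--         while copy > 0:
--             digits.append(copy % 10)
--             copy = copy // 10
--         left = 0
--         right = len(digits) - 1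
--         ok = True
--         while left < right:
--             if digits[left] != digits[right]:
--                 ok = False
--                 break
--             left += 1
--             right -= 1
--         if ok:
--             count += 1
--     return count
-- ===== Notes on version B (the rewrite author's own statement) =====
-- stated objective: alternative
-- what changed: A reverses each number arithmetically into a second integer and compares it with n; B extracts the digits into a list and decides palindromicity with a two-pointer symmetric scan from both ends (negatives are skipped outright instead of failing the numeric comparison).
import Mathlib
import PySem

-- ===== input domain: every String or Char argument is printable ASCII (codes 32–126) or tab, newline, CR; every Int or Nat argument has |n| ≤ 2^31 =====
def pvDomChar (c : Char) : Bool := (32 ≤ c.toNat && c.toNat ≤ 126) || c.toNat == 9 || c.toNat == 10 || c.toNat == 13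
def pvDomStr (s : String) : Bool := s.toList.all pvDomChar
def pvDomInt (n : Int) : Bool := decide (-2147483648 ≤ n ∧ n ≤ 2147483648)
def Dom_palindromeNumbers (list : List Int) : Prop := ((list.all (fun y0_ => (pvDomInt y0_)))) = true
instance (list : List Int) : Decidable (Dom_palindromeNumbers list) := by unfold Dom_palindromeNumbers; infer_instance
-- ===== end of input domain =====

-- B builds each number's digit list and checks it with a two-pointer symmetric scan,
-- instead of A's arithmetic re-reversal into a second integer (objective: alternative).

-- termination helper for the digit loops (cited in the decreasing_by of both ports)
theorem pvFloordivTen_lt (copy : Int) (h : 0 < copy) :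
    (PySem.Int.floordiv copy 10).toNat < copy.toNat := by
  rw [PySem.Int.floordiv_eq_ediv_of_pos (by omega : (0:Int) < 10)]
  have h1 : copy / 10 < copy := by
    rw [Int.ediv_lt_iff_lt_mul (by omega)]
    nlinarith
  have h2 : 0 ≤ copy / 10 := Int.ediv_nonneg (le_of_lt h) (by omega)
  omega

-- ===== PORT A =====
-- the inner 'while copy > 0: pal = pal*10 + copy % 10; copy = copy//10'
def revLoop (copy pal : Int) : Int :=
  if 0 < copy then
    revLoop (PySem.Int.floordiv copy 10) (pal * 10 + PySem.Int.mod copy 10)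
  else pal
termination_by copy.toNat
decreasing_by exact pvFloordivTen_lt _ (by omega)

def palindromeNumbers (list : List Int) : Int :=
  list.foldl (fun count n => if n = revLoop n 0 then count + 1 else count) 0

-- ===== PORT B =====
-- 'while copy > 0: digits.append(copy % 10); copy //= 10' — digits, least significant first
def digitsOf (copy : Int) : List Int :=
  if 0 < copy then
    PySem.Int.mod copy 10 :: digitsOf (PySem.Int.floordiv copy 10)
  else []
termination_by copy.toNat
decreasing_by exact pvFloordivTen_lt _ (by omega)

-- the two-pointer scan; indices are always in range whenever l < r here (0 ≤ l, r < len),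
-- so comparing the pyGet? options is exact for Python's digits[left] != digits[right]
def tpCheck (digits : List Int) (l r : Int) : Bool :=
  if h : l < r then
    if PySem.List.pyGet? digits l ≠ PySem.List.pyGet? digits r then false
    else tpCheck digits (l + 1) (r - 1)
  else true
termination_by (r - l).toNat
decreasing_by omega

def palindromeNumbers_alt (list : List Int) : Int :=
  list.foldl
    (fun count n =>
      if n < 0 then count
      else
        let digits := digitsOf n
        if tpCheck digits 0 ((digits.length : Int) - 1) then count + 1 else count)
    0

-- ===== PRECONDITION & SPEC =====
def Spec_palindromeNumbers (list : List Int) (out : Int) : Prop := out = palindromeNumbers_alt list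
instance (list : List Int) (out : Int) : Decidable (Spec_palindromeNumbers list out) := by unfold Spec_palindromeNumbers; infer_instance

-- ===== CLAIM (what is proved, stated in full; the proofs are below) =====
def Claim_equal_palindromeNumbers : Prop := ∀ (list : List Int), Dom_palindromeNumbers list → Spec_palindromeNumbers list (palindromeNumbers list)

-- ===== LEMMAS AND PROOFS =====

theorem pvDigitsOf_pos {n : Int} (h : 0 < n) :
    digitsOf n = PySem.Int.mod n 10 :: digitsOf (PySem.Int.floordiv n 10) := by
  rw [digitsOf, if_pos h]

theorem pvDigitsOf_nonpos {n : Int} (h : ¬ 0 < n) : digitsOf n = [] := by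
  rw [digitsOf, if_neg h]

theorem pvRevLoop_pos {n : Int} (pal : Int) (h : 0 < n) :
    revLoop n pal = revLoop (PySem.Int.floordiv n 10) (pal * 10 + PySem.Int.mod n 10) := by
  rw [revLoop, if_pos h]

theorem pvRevLoop_nonpos {n : Int} (pal : Int) (h : ¬ 0 < n) : revLoop n pal = pal := by
  rw [revLoop, if_neg h]

-- value of a digit list, head = least significant digit
def pvVal (ds : List Int) : Int := ds.foldr (fun d acc => d + 10 * acc) 0

theorem pvVal_nil : pvVal [] = 0 := rfl
theorem pvVal_cons (d : Int) (ds : List Int) : pvVal (d :: ds) = d + 10 * pvVal ds := rfl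

theorem pvVal_append_singleton (ds : List Int) (d : Int) :
    pvVal (ds ++ [d]) = pvVal ds + d * 10 ^ ds.length := by
  induction ds with
  | nil => simp [pvVal]
  | cons e es ih => simp only [List.cons_append, pvVal_cons, ih, List.length_cons]; ring

theorem pvDigits_bounds (n : Int) : ∀ d ∈ digitsOf n, 0 ≤ d ∧ d < 10 := by
  induction n using digitsOf.induct with
  | case1 n h ih =>
    rw [pvDigitsOf_pos h]
    intro d hd
    rcases List.mem_cons.mp hd with rfl | hd
    · exact ⟨PySem.Int.mod_nonneg _ (by omega), PySem.Int.mod_lt _ (by omega)⟩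
    · exact ih d hd
  | case2 n h =>
    rw [pvDigitsOf_nonpos h]
    intro d hd
    simp at hd

theorem pvVal_digitsOf (n : Int) (h : 0 < n) : pvVal (digitsOf n) = n := by
  induction n using digitsOf.induct with
  | case1 n hn ih =>
    rw [pvDigitsOf_pos hn, pvVal_cons]
    have hdm := PySem.Int.floordiv_mul_add_mod n 10
    have hmlt := PySem.Int.mod_lt n (by omega : (0:Int) < 10)
    have hmge := PySem.Int.mod_nonneg n (by omega : (0:Int) < 10)
    by_cases h10 : 0 < PySem.Int.floordiv n 10
    · rw [ih h10]; omega
    · rw [pvDigitsOf_nonpos h10, pvVal_nil]; omega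
  | case2 n hn => omega

theorem pvVal_nonneg (ds : List Int) (h : ∀ d ∈ ds, 0 ≤ d ∧ d < 10) : 0 ≤ pvVal ds := by
  induction ds with
  | nil => simp [pvVal]
  | cons d es ih =>
    have hd := h d (List.mem_cons_self ..)
    have := ih (fun e he => h e (List.mem_cons_of_mem _ he))
    rw [pvVal_cons]; omega

theorem pvVal_inj (ds : List Int) : ∀ (es : List Int), ds.length = es.length →
    (∀ d ∈ ds, 0 ≤ d ∧ d < 10) → (∀ d ∈ es, 0 ≤ d ∧ d < 10) →
    pvVal ds = pvVal es → ds = es := by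
  induction ds with
  | nil =>
    intro es hlen _ _ _
    cases es with
    | nil => rfl
    | cons e es => simp at hlen
  | cons d ds ih =>
    intro es hlen hd he hv
    cases es with
    | nil => simp at hlen
    | cons e es =>
      have h1 := hd d (List.mem_cons_self ..)
      have h2 := he e (List.mem_cons_self ..)
      have hv1 : 0 ≤ pvVal ds := pvVal_nonneg ds (fun x hx => hd x (List.mem_cons_of_mem _ hx))
      have hv2 : 0 ≤ pvVal es := pvVal_nonneg es (fun x hx => he x (List.mem_cons_of_mem _ hx))
      rw [pvVal_cons, pvVal_cons] at hv
      have hde : d = e ∧ pvVal ds = pvVal es := by omega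
      have htail := ih es (by simpa using hlen)
        (fun x hx => hd x (List.mem_cons_of_mem _ hx))
        (fun x hx => he x (List.mem_cons_of_mem _ hx)) hde.2
      rw [hde.1, htail]

-- A's loop, characterised: it pushes the digits of copy onto pal
theorem pvRevLoop_eq (copy : Int) : ∀ pal : Int,
    revLoop copy pal = pal * 10 ^ (digitsOf copy).length + pvVal (digitsOf copy).reverse := by
  induction copy using digitsOf.induct with
  | case1 n hn ih =>
    intro pal
    rw [pvRevLoop_pos pal hn, ih, pvDigitsOf_pos hn]
    simp only [List.reverse_cons, pvVal_append_singleton, List.length_cons,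
      List.length_reverse]
    ring
  | case2 n hn =>
    intro pal
    rw [pvRevLoop_nonpos pal hn, pvDigitsOf_nonpos hn]
    simp [pvVal_nil]

-- two-pointer scan, characterised by index-symmetric equality on [l, r]
theorem pvTp_iff (k : Nat) : ∀ (ds : List Int) (l r : Nat), r - l = k → r < ds.length →
    (tpCheck ds (l : Int) (r : Int) = true ↔
      ∀ i : Nat, l ≤ i → i ≤ r → ds.getD i 0 = ds.getD (l + r - i) 0) := by
  induction k using Nat.strong_induction_on with
  | _ k ih =>
    intro ds l r hk hr
    by_cases hlr : l < r
    · have hl1 : ((l : Int) + 1) = ((l + 1 : Nat) : Int) := by push_cast; ring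
      have hr1 : ((r : Int) - 1) = ((r - 1 : Nat) : Int) := by omega
      rw [tpCheck, dif_pos (by exact_mod_cast hlr), hl1, hr1]
      have hgl : PySem.List.pyGet? ds (l : Int) = some (ds.getD l 0) := by
        rw [PySem.List.pyGet?_natCast,
          List.getElem?_eq_getElem (by omega : l < ds.length),
          List.getD_eq_getElem ds 0 (by omega : l < ds.length)]
      have hgr : PySem.List.pyGet? ds (r : Int) = some (ds.getD r 0) := by
        rw [PySem.List.pyGet?_natCast, List.getElem?_eq_getElem hr,
          List.getD_eq_getElem ds 0 hr]
      rw [hgl, hgr]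
      by_cases heq : ds.getD l 0 = ds.getD r 0
      · rw [if_neg (by simp only [ne_eq, Option.some.injEq, not_not]; exact heq),
          ih (r - 1 - (l + 1)) (by omega) ds (l + 1) (r - 1) rfl (by omega)]
        constructor
        · intro h i hi1 hi2
          by_cases hil : i = l
          · rw [hil, show l + r - l = r from by omega]
            exact heq
          · by_cases hir : i = r
            · rw [hir, show l + r - r = l from by omega]
              exact heq.symm
            · have := h i (by omega) (by omega)
              have harith : l + 1 + (r - 1) - i = l + r - i := by omega
              rwa [harith] at this
        · intro h i hi1 hi2
          have := h i (by omega) (by omega)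
          have harith : l + r - i = l + 1 + (r - 1) - i := by omega
          rwa [harith] at this
      · rw [if_pos (by simp only [ne_eq, Option.some.injEq]; exact heq)]
        simp only [Bool.false_eq_true, false_iff]
        intro h
        have := h l (le_refl l) (by omega)
        have harith : l + r - l = r := by omega
        rw [harith] at this
        exact heq this
    · rw [tpCheck, dif_neg (fun hc => hlr (by exact_mod_cast hc))]
      simp only [true_iff]
      intro i hi1 hi2
      have hil : i = l ∧ l = r := by omega
      rw [hil.1, hil.2]
      congr 1
      omega

theorem pvPalindrome_iff_tp (ds : List Int) (hne : ds ≠ []) :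
    (tpCheck ds 0 ((ds.length : Int) - 1) = true) ↔ ds.reverse = ds := by
  have hlen : 1 ≤ ds.length := List.length_pos_iff.mpr hne
  have hcast : ((ds.length : Int) - 1) = ((ds.length - 1 : Nat) : Int) := by omega
  rw [hcast, show (0 : Int) = ((0 : Nat) : Int) from rfl,
    pvTp_iff (ds.length - 1 - 0) ds 0 (ds.length - 1) rfl (by omega)]
  constructor
  · intro h
    apply List.ext_getElem (by simp)
    intro i h1 h2
    have hi : i < ds.length := by omega
    have := h i (by omega) (by omega)
    have harith : 0 + (ds.length - 1) - i = ds.length - 1 - i := by omega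
    rw [harith, List.getD_eq_getElem ds 0 hi,
      List.getD_eq_getElem ds 0 (by omega : ds.length - 1 - i < ds.length)] at this
    rw [List.getElem_reverse]
    exact this.symm
  · intro h i hi1 hi2
    have hi : i < ds.length := by omega
    have harith : 0 + (ds.length - 1) - i = ds.length - 1 - i := by omega
    rw [harith, List.getD_eq_getElem ds 0 hi,
      List.getD_eq_getElem ds 0 (by omega : ds.length - 1 - i < ds.length)]
    have h1 : ds[i]? = ds.reverse[i]? := by rw [h]
    rw [List.getElem?_reverse hi] at h1
    rw [List.getElem?_eq_getElem hi,
      List.getElem?_eq_getElem (by omega : ds.length - 1 - i < ds.length)] at h1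
    exact Option.some.inj h1

-- per-element agreement of the two loop bodies
theorem pvStep_eq (count n : Int) :
    (if n = revLoop n 0 then count + 1 else count) =
      (if n < 0 then count
       else
         let digits := digitsOf n
         if tpCheck digits 0 ((digits.length : Int) - 1) then count + 1 else count) := by
  show (if n = revLoop n 0 then count + 1 else count) =
      (if n < 0 then count
       else if tpCheck (digitsOf n) 0 (((digitsOf n).length : Int) - 1) then count + 1
       else count)
  rcases lt_trichotomy n 0 with hn | hn | hn
  · have h0 : revLoop n 0 = 0 := pvRevLoop_nonpos (n := n) 0 (by omega)
    rw [if_neg (show ¬ n = revLoop n 0 by rw [h0]; omega), if_pos hn]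
  · subst hn
    have h0 : revLoop 0 0 = 0 := pvRevLoop_nonpos (n := 0) 0 (by omega)
    have hd : digitsOf 0 = [] := pvDigitsOf_nonpos (n := 0) (by omega)
    have htp : tpCheck [] 0 (((List.length ([] : List Int)) : Int) - 1) = true := by
      rw [tpCheck]
      norm_num
    rw [if_pos h0.symm, if_neg (show ¬ (0:Int) < 0 by omega), hd, if_pos htp]
  · rw [if_neg (show ¬ n < 0 by omega)]
    have hne : digitsOf n ≠ [] := by rw [pvDigitsOf_pos hn]; simp
    have hA : n = revLoop n 0 ↔ (digitsOf n).reverse = digitsOf n := by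
      rw [pvRevLoop_eq n 0]
      simp only [zero_mul, zero_add]
      constructor
      · intro h
        apply pvVal_inj _ _ (by simp)
          (fun d hd => pvDigits_bounds n d (List.mem_reverse.mp hd))
          (pvDigits_bounds n)
        rw [← h, pvVal_digitsOf n hn]
      · intro h
        rw [h, pvVal_digitsOf n hn]
    by_cases h : (digitsOf n).reverse = digitsOf n
    · rw [if_pos (hA.mpr h), if_pos ((pvPalindrome_iff_tp (digitsOf n) hne).mpr h)]
    · rw [if_neg (fun hc => h (hA.mp hc)),
        if_neg (fun hc => h ((pvPalindrome_iff_tp (digitsOf n) hne).mp hc))]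

theorem pvFoldl_congr {f g : Int → Int → Int} (h : ∀ a b, f a b = g a b) :
    ∀ (xs : List Int) (init : Int), xs.foldl f init = xs.foldl g init := by
  intro xs
  induction xs with
  | nil => intro _; rfl
  | cons x xs ih =>
    intro init
    simp only [List.foldl_cons, h, ih]

-- ===== VERDICT (by name: the statement is the Claim_ definition above) =====
theorem palindromeNumbers_spec : Claim_equal_palindromeNumbers := by
  intro list _
  unfold Spec_palindromeNumbers palindromeNumbers palindromeNumbers_alt
  exact pvFoldl_congr (fun a b => pvStep_eq a b) list 0
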